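-- pv_equiv track=rewrite | github.com/h0meb0dy/Programmers | 모의고사/solve.py | solution
-- ===== SOURCE A (Python) =====
-- def solution(answers):
--     # calculate supoja1's score
--     supoja1_score = 0
--     for prob_num in range(len(answers)):
--         if answers[prob_num] == prob_num % 5 + 1:
--             supoja1_score += 1
--
--     # calculate supoja2's score
--     supoja2_score = 0
--     for prob_num in range(len(answers)):
--         if prob_num % 2 == 0:
--             if answers[prob_num] == 2:
--                 supoja2_score += 1
--         elif prob_num % 8 == 1 or prob_num % 8 == 3:
--             if answers[prob_num] == prob_num % 8:
--                 supoja2_score += 1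
--         elif prob_num % 8 == 5:
--             if answers[prob_num] == 4:
--                 supoja2_score += 1
--         elif prob_num % 8 == 7:
--             if answers[prob_num] == 5:
--                 supoja2_score += 1
--
--     # calculate supoja3's score
--     supoja3_score = 0
--     for prob_num in range(len(answers)):
--         if prob_num % 10 == 0 or prob_num % 10 == 1:
--             if answers[prob_num] == 3:
--                 supoja3_score += 1
--         elif prob_num % 10 == 2 or prob_num % 10 == 3:
--             if answers[prob_num] == 1:
--                 supoja3_score += 1
--         elif prob_num % 10 == 4 or prob_num % 10 == 5:
--             if answers[prob_num] == 2:
--                 supoja3_score += 1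
--         elif prob_num % 10 == 6 or prob_num % 10 == 7:
--             if answers[prob_num] == 4:
--                 supoja3_score += 1
--         elif prob_num % 10 == 8 or prob_num % 10 == 9:
--             if answers[prob_num] == 5:
--                 supoja3_score += 1
--
--     # get answer
--     answer = [1, 2, 3]
--     if supoja1_score < supoja2_score or supoja1_score < supoja3_score:
--         answer.remove(1)
--     if supoja2_score < supoja1_score or supoja2_score < supoja3_score:
--         answer.remove(2)
--     if supoja3_score < supoja1_score or supoja3_score < supoja2_score:
--         answer.remove(3)
--
--     return answer
-- ===== SOURCE B (Python) =====
-- def solution(answers):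
--     # Block-wise re-implementation: cut the answer sheet into consecutive blocks
--     # of each pattern's length and compare every block elementwise (zip) to the
--     # pattern -- no per-index modular arithmetic; then keep the max scorers.
--     patterns = [[1, 2, 3, 4, 5],
--                 [2, 1, 2, 3, 2, 4, 2, 5],
--                 [3, 3, 1, 1, 2, 2, 4, 4, 5, 5]]
--     scores = []
--     for p in patterns:
--         L = len(p)
--         s = 0
--         for start in range(0, len(answers), L):
--             for x, y in zip(answers[start:start + L], p):
--                 if x == y:
--                     s += 1
--         scores.append(s)
--     m = max(scores)
--     return [k + 1 for k in range(3) if scores[k] == m]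
-- ===== Notes on version B (the rewrite author's own statement) =====
-- stated objective: alternative
-- what changed: Replaces A's three per-index loops with modular-arithmetic branch chains by a block-wise scorer: the answer sheet is cut into consecutive blocks of each pattern's length and every block is compared elementwise (zip) against the pattern, so scoring uses no index/mod arithmetic at all; the winners are then selected with max() over the score table instead of A's remove-chain.
import Mathlib
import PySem

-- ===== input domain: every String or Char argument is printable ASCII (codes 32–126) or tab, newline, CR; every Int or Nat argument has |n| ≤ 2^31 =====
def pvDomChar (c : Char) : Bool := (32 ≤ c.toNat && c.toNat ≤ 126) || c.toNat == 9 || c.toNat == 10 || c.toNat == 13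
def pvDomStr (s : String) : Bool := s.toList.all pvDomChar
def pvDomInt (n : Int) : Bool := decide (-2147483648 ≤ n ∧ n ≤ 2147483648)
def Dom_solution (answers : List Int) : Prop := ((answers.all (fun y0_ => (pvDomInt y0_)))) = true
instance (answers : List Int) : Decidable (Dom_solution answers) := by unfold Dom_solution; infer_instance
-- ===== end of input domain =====

-- B scores each fake pattern by cutting the answers into consecutive blocks of the
-- pattern's length and comparing blocks elementwise (zip) — no per-index modular
-- branch chains — then selects winners with a max-filter (objective: alternative).


-- ===== PORT A =====
-- 'answer.remove(x)' always finds x here (1,2,3 are distinct, each removed at most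
-- once), so '(remove? …).getD' is exact; the .getD 0 on pyGetD never fires (index in range).
def supoja1Score (answers : List Int) : Int :=
  (PySem.List.pyRange 0 (PySem.List.len answers) 1).foldl (fun s j =>
      if PySem.List.pyGetD answers j 0 = PySem.Int.mod j 5 + 1 then s + 1 else s) 0

def supoja2Score (answers : List Int) : Int :=
  (PySem.List.pyRange 0 (PySem.List.len answers) 1).foldl (fun s j =>
      if PySem.Int.mod j 2 = 0 then
        (if PySem.List.pyGetD answers j 0 = 2 then s + 1 else s)
      else if PySem.Int.mod j 8 = 1 ∨ PySem.Int.mod j 8 = 3 then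
        (if PySem.List.pyGetD answers j 0 = PySem.Int.mod j 8 then s + 1 else s)
      else if PySem.Int.mod j 8 = 5 then
        (if PySem.List.pyGetD answers j 0 = 4 then s + 1 else s)
      else if PySem.Int.mod j 8 = 7 then
        (if PySem.List.pyGetD answers j 0 = 5 then s + 1 else s)
      else s) 0

def supoja3Score (answers : List Int) : Int :=
  (PySem.List.pyRange 0 (PySem.List.len answers) 1).foldl (fun s j =>
      if PySem.Int.mod j 10 = 0 ∨ PySem.Int.mod j 10 = 1 then
        (if PySem.List.pyGetD answers j 0 = 3 then s + 1 else s)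
      else if PySem.Int.mod j 10 = 2 ∨ PySem.Int.mod j 10 = 3 then
        (if PySem.List.pyGetD answers j 0 = 1 then s + 1 else s)
      else if PySem.Int.mod j 10 = 4 ∨ PySem.Int.mod j 10 = 5 then
        (if PySem.List.pyGetD answers j 0 = 2 then s + 1 else s)
      else if PySem.Int.mod j 10 = 6 ∨ PySem.Int.mod j 10 = 7 then
        (if PySem.List.pyGetD answers j 0 = 4 then s + 1 else s)
      else if PySem.Int.mod j 10 = 8 ∨ PySem.Int.mod j 10 = 9 then
        (if PySem.List.pyGetD answers j 0 = 5 then s + 1 else s)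
      else s) 0

def solution (answers : List Int) : List Int :=
  let s1 := supoja1Score answers
  let s2 := supoja2Score answers
  let s3 := supoja3Score answers
  let a0 : List Int := [1, 2, 3]
  let a1 := if s1 < s2 ∨ s1 < s3 then (PySem.List.remove? a0 1).getD a0 else a0
  let a2 := if s2 < s1 ∨ s2 < s3 then (PySem.List.remove? a1 2).getD a1 else a1
  let a3 := if s3 < s1 ∨ s3 < s2 then (PySem.List.remove? a2 3).getD a2 else a2
  a3

-- ===== PORT B =====
def patterns_alt : List (List Int) :=
  [[1, 2, 3, 4, 5], [2, 1, 2, 3, 2, 4, 2, 5], [3, 3, 1, 1, 2, 2, 4, 4, 5, 5]]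

-- block-wise scorer: 'for start in range(0, len(answers), L): for x, y in zip(answers[start:start+L], p): …'
def score_alt (answers p : List Int) : Int :=
  let L := PySem.List.len p
  (PySem.List.pyRange 0 (PySem.List.len answers) L).foldl
    (fun s start =>
      ((PySem.List.slice answers (some start) (some (start + L))).zip p).foldl
        (fun s q => if q.1 = q.2 then s + 1 else s) s) 0

-- 'max(scores)' on the always-nonempty 3-element list: '(max? …).getD' is exact.
def solution_alt (answers : List Int) : List Int :=
  let scores := patterns_alt.map (score_alt answers)
  let m := (PySem.List.max? scores (fun x => x)).getD 0
  (List.range 3).filterMap (fun k => if scores.getD k 0 = m then some ((k : Int) + 1) else none)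

-- ===== PRECONDITION & SPEC =====
def Spec_solution (answers : List Int) (out : List Int) : Prop := out = solution_alt answers
instance (answers : List Int) (out : List Int) : Decidable (Spec_solution answers out) := by unfold Spec_solution; infer_instance

-- ===== CLAIM (what is proved, stated in full; the proofs are below) =====
def Claim_equal_solution : Prop := ∀ (answers : List Int), Dom_solution answers → Spec_solution answers (solution answers)

-- ===== LEMMAS AND PROOFS =====

-- the common reference count: matches of xs against the cycle of p, by index
def cntNat (p xs : List Int) : Nat :=
  (List.range xs.length).countP (fun k => decide (xs.getD k 0 = p.getD (k % p.length) 0))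

lemma zip_countP (xs p : List Int) :
    (xs.zip p).countP (fun q => decide (q.1 = q.2))
      = (List.range (min xs.length p.length)).countP
          (fun k => decide (xs.getD k 0 = p.getD k 0)) := by
  induction xs generalizing p with
  | nil => simp
  | cons x t ih =>
    cases p with
    | nil => simp
    | cons y u =>
      rw [List.zip_cons_cons, List.countP_cons, ih u,
          show min (x::t).length (y::u).length = min t.length u.length + 1 from by
            simp [Nat.succ_min_succ],
          List.range_succ_eq_map, List.countP_cons, List.countP_map]
      simp [Function.comp_def, Nat.add_comm]
      rfl


lemma cnt_step (p xs : List Int) :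
    cntNat p xs
      = (xs.zip p).countP (fun q => decide (q.1 = q.2)) + cntNat p (xs.drop p.length) := by
  by_cases hle : xs.length ≤ p.length
  · rw [List.drop_eq_nil_of_le hle]
    rw [zip_countP, Nat.min_eq_left hle]
    unfold cntNat
    simp only [List.length_nil, List.range_zero, List.countP_nil, Nat.add_zero]
    apply List.countP_congr
    intro k hk
    have hk' : k < xs.length := List.mem_range.mp hk
    rw [Nat.mod_eq_of_lt (by omega)]
  · unfold cntNat
    rw [show xs.length = p.length + (xs.length - p.length) from by omega,
        List.range_add, List.countP_append, List.countP_map]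
    congr 1
    · rw [zip_countP, Nat.min_eq_right (by omega)]
      apply List.countP_congr
      intro k hk
      have hk' : k < p.length := List.mem_range.mp hk
      rw [Nat.mod_eq_of_lt hk']
    · rw [show (xs.drop p.length).length = xs.length - p.length from by simp]
      apply List.countP_congr
      intro k hk
      simp only [Function.comp_def]
      rw [show (xs.drop p.length).getD k 0 = xs.getD (p.length + k) 0 from by
            simp [List.getD, List.getElem?_drop],
          Nat.add_mod_left]


lemma take_zip_countP (xs p : List Int) :
    ((xs.take p.length).zip p).countP (fun q => decide (q.1 = q.2))
      = (xs.zip p).countP (fun q => decide (q.1 = q.2)) := by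
  rw [zip_countP, zip_countP, List.length_take]
  rw [show min (min p.length xs.length) p.length = min xs.length p.length from by omega]
  apply List.countP_congr
  intro k hk
  have hk' : k < min xs.length p.length := List.mem_range.mp hk
  rw [show (xs.take p.length).getD k 0 = xs.getD k 0 from by
        simp [List.getD, show k < p.length from by omega]]


lemma sum_chunks (p : List Int) (hL : 0 < p.length) (xs : List Int) :
    ((List.range ((xs.length + p.length - 1) / p.length)).map
       (fun k => (((xs.drop (p.length * k)).take p.length).zip p).countP
                   (fun q => decide (q.1 = q.2)))).sum = cntNat p xs := by
  by_cases hn : xs.length = 0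
  · rw [show (xs.length + p.length - 1) / p.length = 0 from by
          rw [hn]; exact Nat.div_eq_of_lt (by omega)]
    unfold cntNat
    rw [hn]; simp
  · have hrec := sum_chunks p hL (xs.drop p.length)
    have hlen : (xs.drop p.length).length = xs.length - p.length := by simp
    have hm : (xs.length + p.length - 1) / p.length
        = ((xs.length - p.length) + p.length - 1) / p.length + 1 := by
      by_cases hle : xs.length ≤ p.length
      · rw [show xs.length - p.length = 0 from by omega,
            show (0 + p.length - 1) / p.length = 0 from Nat.div_eq_of_lt (by omega),
            show xs.length + p.length - 1 = (xs.length - 1) + p.length from by omega,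
            Nat.add_div_right _ hL, Nat.div_eq_of_lt (by omega)]
      · rw [show xs.length + p.length - 1 = ((xs.length - p.length) + p.length - 1) + p.length from by omega,
            Nat.add_div_right _ hL]
    rw [hm, List.range_succ_eq_map, List.map_cons, List.sum_cons, List.map_map]
    rw [cnt_step p xs]
    congr 1
    · rw [Nat.mul_zero, List.drop_zero, take_zip_countP]
    · rw [← hrec, ← hlen]
      congr 1
      apply List.map_congr_left
      intro k hk
      simp only [Function.comp_def]
      rw [show p.length * (Nat.succ k) = p.length + p.length * k from by rw [Nat.mul_succ]; omega,
          ← List.drop_drop]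
termination_by xs.length
decreasing_by
  simp
  omega


lemma scoreB (p xs : List Int) (hL : 0 < p.length) :
    score_alt xs p = (cntNat p xs : Int) := by
  simp only [score_alt, PySem.List.len_eq]
  rw [PySem.List.pyRange_of_pos 0 (xs.length : Int) (s := (p.length : Int)) (by exact_mod_cast hL)]
  rw [show (if (0:Int) < (xs.length:Int) then (((xs.length:Int) - 0 + (p.length:Int) - 1) / (p.length:Int)).toNat else 0)
        = (xs.length + p.length - 1) / p.length from by
      by_cases hn : xs.length = 0
      · rw [hn]
        simp
        exact (Nat.div_eq_of_lt (by omega)).symm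
      · rw [if_pos (by exact_mod_cast Nat.pos_of_ne_zero hn)]
        rw [show (xs.length:Int) - 0 + (p.length:Int) - 1 = ((xs.length + p.length - 1 : Nat) : Int) from by omega]
        rw [← Int.natCast_div, Int.toNat_natCast]]
  rw [List.foldl_map]
  rw [PySem.List.foldl_congr_mem _ _ (fun (s : Int) (k : Nat) =>
        s + ((((xs.drop (p.length * k)).take p.length).zip p).countP
               (fun q => decide (q.1 = q.2)) : Int)) _ ?_]
  · rw [PySem.List.foldl_add, ← sum_chunks p hL xs, Nat.cast_list_sum, List.map_map]
    simp [Function.comp_def]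
  · intro s k hk
    rw [show (0:Int) + (p.length:Int) * (k:Int) = ((p.length * k : Nat) : Int) from by push_cast; ring,
        show ((p.length * k : Nat) : Int) + (p.length : Int) = ((p.length * k : Nat) : Int) + ((p.length : Nat) : Int) from by norm_num,
        PySem.List.slice_natCast_add]
    rw [PySem.List.foldl_ite_add_one]


lemma scoreA1 (answers : List Int) :
    supoja1Score answers = (cntNat [1, 2, 3, 4, 5] answers : Int) := by
  unfold supoja1Score cntNat
  rw [show PySem.List.len answers = (answers.length : Int) from by simp,
      PySem.List.pyRange_zero_natCast, List.foldl_map]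
  rw [PySem.List.foldl_congr_mem _ _ (fun (s : Int) (k : Nat) =>
        if answers.getD k 0 = [(1:Int),2,3,4,5].getD (k % [(1:Int),2,3,4,5].length) 0 then s + 1 else s) _ ?_]
  · rw [PySem.List.foldl_ite_add_one]
    norm_num
  · intro s k hk
    rw [PySem.List.pyGetD_natCast,
        show (5 : Int) = ((5:Nat) : Int) from rfl, PySem.Int.mod_natCast]
    have h5 : k % 5 = 0 ∨ k % 5 = 1 ∨ k % 5 = 2 ∨ k % 5 = 3 ∨ k % 5 = 4 := by omega
    rcases h5 with h|h|h|h|h <;> simp [h]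


lemma scoreA2 (answers : List Int) :
    supoja2Score answers = (cntNat [2, 1, 2, 3, 2, 4, 2, 5] answers : Int) := by
  unfold supoja2Score cntNat
  rw [show PySem.List.len answers = (answers.length : Int) from by simp,
      PySem.List.pyRange_zero_natCast, List.foldl_map]
  rw [PySem.List.foldl_congr_mem _ _ (fun (s : Int) (k : Nat) =>
        if answers.getD k 0 = [(2:Int),1,2,3,2,4,2,5].getD (k % [(2:Int),1,2,3,2,4,2,5].length) 0 then s + 1 else s) _ ?_]
  · rw [PySem.List.foldl_ite_add_one]
    norm_num
  · intro s k hk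
    rw [PySem.List.pyGetD_natCast,
        show (2 : Int) = ((2:Nat) : Int) from rfl,
        show (8 : Int) = ((8:Nat) : Int) from rfl,
        PySem.Int.mod_natCast, PySem.Int.mod_natCast,
        show k % 2 = k % 8 % 2 from by omega]
    have h8 : k % 8 = 0 ∨ k % 8 = 1 ∨ k % 8 = 2 ∨ k % 8 = 3 ∨ k % 8 = 4 ∨ k % 8 = 5 ∨ k % 8 = 6 ∨ k % 8 = 7 := by omega
    rcases h8 with h|h|h|h|h|h|h|h <;> simp [h]


lemma scoreA3 (answers : List Int) :
    supoja3Score answers = (cntNat [3, 3, 1, 1, 2, 2, 4, 4, 5, 5] answers : Int) := by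
  unfold supoja3Score cntNat
  rw [show PySem.List.len answers = (answers.length : Int) from by simp,
      PySem.List.pyRange_zero_natCast, List.foldl_map]
  rw [PySem.List.foldl_congr_mem _ _ (fun (s : Int) (k : Nat) =>
        if answers.getD k 0 = [(3:Int),3,1,1,2,2,4,4,5,5].getD (k % [(3:Int),3,1,1,2,2,4,4,5,5].length) 0 then s + 1 else s) _ ?_]
  · rw [PySem.List.foldl_ite_add_one]
    norm_num
  · intro s k hk
    rw [PySem.List.pyGetD_natCast,
        show (10 : Int) = ((10:Nat) : Int) from rfl, PySem.Int.mod_natCast]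
    have h10 : k % 10 = 0 ∨ k % 10 = 1 ∨ k % 10 = 2 ∨ k % 10 = 3 ∨ k % 10 = 4 ∨ k % 10 = 5 ∨ k % 10 = 6 ∨ k % 10 = 7 ∨ k % 10 = 8 ∨ k % 10 = 9 := by omega
    rcases h10 with h|h|h|h|h|h|h|h|h|h <;> simp [h]


lemma tail_eq (s1 s2 s3 : Int) :
    (let a0 : List Int := [1, 2, 3]
     let a1 := if s1 < s2 ∨ s1 < s3 then (PySem.List.remove? a0 1).getD a0 else a0
     let a2 := if s2 < s1 ∨ s2 < s3 then (PySem.List.remove? a1 2).getD a1 else a1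
     let a3 := if s3 < s1 ∨ s3 < s2 then (PySem.List.remove? a2 3).getD a2 else a2
     a3)
    = (let scores := [s1, s2, s3]
       let m := (PySem.List.max? scores (fun x => x)).getD 0
       (List.range 3).filterMap (fun k => if scores.getD k 0 = m then some ((k : Int) + 1) else none)) := by
  simp only [PySem.List.max?_id_cons, List.foldl, Option.getD_some,
    List.range_succ, List.range_zero, List.filterMap_append,
    List.filterMap_cons, List.filterMap_nil, List.getD, List.getElem?_cons_zero,
    List.getElem?_cons_succ]
  norm_num
  split_ifs <;> first | (exfalso; omega) | decide

-- ===== VERDICT (by name: the statement is the Claim_ definition above) =====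
theorem solution_spec : Claim_equal_solution := by
  intro answers _
  show solution answers = solution_alt answers
  simp only [solution, solution_alt, patterns_alt, List.map]
  rw [scoreA1, scoreA2, scoreA3, ← scoreB _ _ (by decide), ← scoreB _ _ (by decide),
      ← scoreB _ _ (by decide)]
  exact tail_eq _ _ _
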